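-- pv_equiv track=rewrite | github.com/blakejameson/music-theory | main.py | generate_harmonic_minor_scale
-- ===== SOURCE A (Python) =====
-- music_notes = ["A", "A#","B","C", "C#", "D", "D#", "E", "F","F#", "G", "G#"]
--
-- harmonic_minor_scale_formula = ["W","H","W","W", "H","T","H"]
--
-- flat_to_sharp_conversion_map = {
--     "Bb": "A#",
--     "Db": "C#",
--     "Eb": "D#",
--     "Gb": "F#",
--     "Ab": "G#",
-- }
--
-- sharp_to_flat_conversion_map = {
--     "A#": "Bb",
--     "C#": "Db",
--     "D#": "Eb",
--     "F#": "Gb",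
--     "G#": "Ab"
-- }
--
-- def is_sharp(note: str) -> bool:
--     if len(note) == 1:
--         return False
--     return note[1] == "#"
--
-- def whole_step_after_note(current_note: str, usesFlats: bool) -> str:
--     if usesFlats and current_note in flat_to_sharp_conversion_map and not is_sharp(current_note):
--         current_note = flat_to_sharp_conversion_map[current_note]
--
--     current_note_index_in_music_notes = music_notes.index(current_note)
--     whole_step_after = (current_note_index_in_music_notes + 2) % 12
--     return music_notes[whole_step_after]
--
-- def half_step_after_note(current_note: str, usesFlats: bool) -> str:
--     if usesFlats and current_note in flat_to_sharp_conversion_map and not is_sharp(current_note):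
--         current_note = flat_to_sharp_conversion_map[current_note]
--
--     current_note_index_in_music_notes = music_notes.index(current_note)
--     half_step_after = (current_note_index_in_music_notes + 1) % 12
--     return music_notes[half_step_after]
--
-- def three_step_after_note(current_note: str, usesFlats: bool) -> str:
--     if usesFlats and current_note in flat_to_sharp_conversion_map and not is_sharp(current_note):
--         current_note = flat_to_sharp_conversion_map[current_note]
--
--     current_note_index_in_music_notes = music_notes.index(current_note)
--     half_step_after = (current_note_index_in_music_notes + 3) % 12
--     return music_notes[half_step_after]
--
-- def minor_key_uses_flats(key: str):
--     natural_keys_with_flats = {"D","G","C","F"}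
--     if key in natural_keys_with_flats:
--         return True
--
--     if len(key) == 1:
--         return False
--     return key[1] == "b"
--
-- def generate_harmonic_minor_scale(key: str) -> list[str]:
--     result = []
--     current_key = key
--     uses_flats = minor_key_uses_flats(current_key)
--
--     result.append(current_key)
--
--     for step in harmonic_minor_scale_formula:
--         if step == "W":
--             current_key = whole_step_after_note(current_key, uses_flats)
--         elif step == "H":
--             current_key = half_step_after_note(current_key, uses_flats)
--
--         else:
--             current_key = three_step_after_note(current_key, uses_flats)
--
--
--         if uses_flats and is_sharp(current_key):
--             current_key = sharp_to_flat_conversion_map[current_key]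
--         result.append(current_key)
--
--
--     ## G harmonic minor and D harmonic minor have a sharp note at position 7,
--     # despite having flats in scale
--     if key == "G" or key == "D":
--         result[6] = flat_to_sharp_conversion_map[result[6]]
--
--     return result
-- ===== SOURCE B (Python) =====
-- NOTES = ["A", "A#", "B", "C", "C#", "D", "D#", "E", "F", "F#", "G", "G#"]
-- FLAT_TO_SHARP = {"Bb": "A#", "Db": "C#", "Eb": "D#", "Gb": "F#", "Ab": "G#"}
-- SHARP_TO_FLAT = {"A#": "Bb", "C#": "Db", "D#": "Eb", "F#": "Gb", "G#": "Ab"}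
-- # harmonic minor cumulative offsets W,H,W,W,H,T,H -> 2,3,5,7,8,11,12
--
-- def generate_harmonic_minor_scale(key: str) -> list[str]:
--     uses_flats = key in ("D", "G", "C", "F") or (len(key) > 1 and key[1] == "b")
--     base_name = FLAT_TO_SHARP.get(key, key) if uses_flats else key
--     base = NOTES.index(base_name)
--     result = [key]
--     for o in (2, 3, 5, 7, 8, 11, 12):
--         note = NOTES[(base + o) % 12]
--         if uses_flats:
--             note = SHARP_TO_FLAT.get(note, note)
--         result.append(note)
--     if key in ("G", "D"):
--         result[6] = FLAT_TO_SHARP[result[6]]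
--     return result
-- ===== Notes on version B (the rewrite author's own statement) =====
-- stated objective: simpler
-- what changed: Replaces the chained per-step W/H/T dispatch (each step re-indexing and re-converting the previous note) with a precomputed cumulative-offset table [2,3,5,7,8,11,12] and a single mapping pass from one base index.
import Mathlib
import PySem

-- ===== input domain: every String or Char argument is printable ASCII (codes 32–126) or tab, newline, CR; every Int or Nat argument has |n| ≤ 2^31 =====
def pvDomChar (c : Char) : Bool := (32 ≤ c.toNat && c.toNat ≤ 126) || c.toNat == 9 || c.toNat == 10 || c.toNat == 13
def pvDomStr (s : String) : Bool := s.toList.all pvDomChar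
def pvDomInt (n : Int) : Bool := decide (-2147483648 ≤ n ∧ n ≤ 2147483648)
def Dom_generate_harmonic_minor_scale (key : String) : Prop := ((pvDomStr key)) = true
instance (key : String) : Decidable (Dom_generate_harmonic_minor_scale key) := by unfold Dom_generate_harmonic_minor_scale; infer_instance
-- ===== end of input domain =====

-- B replaces A's chained per-step W/H/T stepping with one cumulative-offset table and a single mapping pass (objective: simpler).

-- ===== PORT A =====
def music_notes : List String := ["A", "A#", "B", "C", "C#", "D", "D#", "E", "F", "F#", "G", "G#"]

def harmonic_minor_scale_formula : List String := ["W", "H", "W", "W", "H", "T", "H"]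

def flat_to_sharp_conversion_map : PySem.Dict String String :=
  PySem.Dict.ofList [("Bb", "A#"), ("Db", "C#"), ("Eb", "D#"), ("Gb", "F#"), ("Ab", "G#")]

def sharp_to_flat_conversion_map : PySem.Dict String String :=
  PySem.Dict.ofList [("A#", "Bb"), ("C#", "Db"), ("D#", "Eb"), ("F#", "Gb"), ("G#", "Ab")]

def is_sharp (note : String) : Bool :=
  if PySem.Str.len note == 1 then false
  else ((PySem.Str.pyGet? note 1).getD ' ') == '#'   -- note[1] raises on ""; total via default, excluded by Pre_

def whole_step_after_note (current_note : String) (usesFlats : Bool) : String :=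
  let current_note :=
    if usesFlats && (flat_to_sharp_conversion_map.contains current_note) && !is_sharp current_note
    then flat_to_sharp_conversion_map.getD current_note "" else current_note
  let idx := (PySem.List.index? music_notes current_note).getD 0   -- .index raises on miss; excluded by Pre_
  let whole_step_after := (idx + 2) % 12
  (PySem.List.pyGet? music_notes (whole_step_after : Int)).getD ""

def half_step_after_note (current_note : String) (usesFlats : Bool) : String :=
  let current_note :=
    if usesFlats && (flat_to_sharp_conversion_map.contains current_note) && !is_sharp current_note
    then flat_to_sharp_conversion_map.getD current_note "" else current_note
  let idx := (PySem.List.index? music_notes current_note).getD 0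
  let half_step_after := (idx + 1) % 12
  (PySem.List.pyGet? music_notes (half_step_after : Int)).getD ""

def three_step_after_note (current_note : String) (usesFlats : Bool) : String :=
  let current_note :=
    if usesFlats && (flat_to_sharp_conversion_map.contains current_note) && !is_sharp current_note
    then flat_to_sharp_conversion_map.getD current_note "" else current_note
  let idx := (PySem.List.index? music_notes current_note).getD 0
  let half_step_after := (idx + 3) % 12
  (PySem.List.pyGet? music_notes (half_step_after : Int)).getD ""

def minor_key_uses_flats (key : String) : Bool :=
  if PySem.Set.contains (PySem.Set.ofList ["D", "G", "C", "F"]) key then true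
  else if PySem.Str.len key == 1 then false
  else ((PySem.Str.pyGet? key 1).getD ' ') == 'b'

def generate_harmonic_minor_scale (key : String) : List String :=
  let uses_flats := minor_key_uses_flats key
  let st :=
    harmonic_minor_scale_formula.foldl
      (fun (st : String × List String) step =>
        let current_key := st.1
        let current_key :=
          if step == "W" then whole_step_after_note current_key uses_flats
          else if step == "H" then half_step_after_note current_key uses_flats
          else three_step_after_note current_key uses_flats
        let current_key :=
          if uses_flats && is_sharp current_key
          then sharp_to_flat_conversion_map.getD current_key ""
          else current_key
        (current_key, st.2 ++ [current_key]))
      (key, [key])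
  let result := st.2
  if key == "G" || key == "D" then
    result.set 6 (flat_to_sharp_conversion_map.getD ((PySem.List.pyGet? result 6).getD "") "")
  else result

-- ===== PORT B =====
def notesB : List String := ["A", "A#", "B", "C", "C#", "D", "D#", "E", "F", "F#", "G", "G#"]
def flatToSharpB : PySem.Dict String String :=
  PySem.Dict.ofList [("Bb", "A#"), ("Db", "C#"), ("Eb", "D#"), ("Gb", "F#"), ("Ab", "G#")]
def sharpToFlatB : PySem.Dict String String :=
  PySem.Dict.ofList [("A#", "Bb"), ("C#", "Db"), ("D#", "Eb"), ("F#", "Gb"), ("G#", "Ab")]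

def generate_harmonic_minor_scale_alt (key : String) : List String :=
  let uses_flats := ["D", "G", "C", "F"].contains key
      || (1 < PySem.Str.len key && ((PySem.Str.pyGet? key 1).getD ' ') == 'b')
  let base_name := if uses_flats then flatToSharpB.getD key key else key
  let base := (PySem.List.index? notesB base_name).getD 0   -- .index raises on miss; excluded by Pre_
  let result := key ::
    ([2, 3, 5, 7, 8, 11, 12].map (fun (o : Nat) =>
      let note := (PySem.List.pyGet? notesB (((base + o) % 12 : Nat) : Int)).getD ""
      if uses_flats then sharpToFlatB.getD note note else note))
  if ["G", "D"].contains key then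
    result.set 6 (flatToSharpB.getD ((PySem.List.pyGet? result 6).getD "") "")
  else result

-- ===== PRECONDITION & SPEC =====
-- Pre_ admits exactly the 17 key names on which A returns normally; on any other
-- string A raises (ValueError from list.index / IndexError on "").
def Pre_generate_harmonic_minor_scale (key : String) : Prop :=
  key ∈ (["A", "A#", "B", "C", "C#", "D", "D#", "E", "F", "F#", "G", "G#",
          "Bb", "Db", "Eb", "Gb", "Ab"] : List String)
instance (key : String) : Decidable (Pre_generate_harmonic_minor_scale key) := by
  unfold Pre_generate_harmonic_minor_scale; infer_instance

def pvWitness_generate_harmonic_minor_scale : String := "A"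

def Spec_generate_harmonic_minor_scale (key : String) (out : List String) : Prop :=
  out = generate_harmonic_minor_scale_alt key
instance (key : String) (out : List String) : Decidable (Spec_generate_harmonic_minor_scale key out) := by
  unfold Spec_generate_harmonic_minor_scale; infer_instance

-- ===== CLAIM (what is proved, stated in full; the proofs are below) =====
def Claim_equal_generate_harmonic_minor_scale : Prop :=
  ∀ (key : String), Dom_generate_harmonic_minor_scale key →
    Pre_generate_harmonic_minor_scale key →
    Spec_generate_harmonic_minor_scale key (generate_harmonic_minor_scale key)

-- ===== LEMMAS AND PROOFS =====

-- ===== VERDICT =====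
theorem generate_harmonic_minor_scale_spec : Claim_equal_generate_harmonic_minor_scale := by
  intro key hdom hpre
  unfold Pre_generate_harmonic_minor_scale at hpre
  unfold Spec_generate_harmonic_minor_scale
  simp only [List.mem_cons, List.not_mem_nil, or_false] at hpre
  rcases hpre with rfl | rfl | rfl | rfl | rfl | rfl | rfl | rfl | rfl | rfl | rfl | rfl | rfl | rfl | rfl | rfl | rfl <;> decide
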